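-- pv_equiv track=rewrite | github.com/leftos/vatsim_control_recs | airport_disambiguator/entity_extractor.py | get_first_occurring_entity
-- ===== SOURCE A (Python) =====
-- from typing import List, Optional, Tuple
--
-- def get_first_occurring_entity(airport_name: str, persons: List[str], locations: List[str]) -> Optional[str]:
--     """
--     Determine which entity appears first in the airport name.
--     Prioritizes the first complete entity found.
--     """
--     if not persons and not locations:
--         return None
--
--     # Clean name for searching
--     clean_name = airport_name.lower()
--
--     # Find positions of all entities
--     entity_positions = []
--
--     for person in persons:
--         pos = clean_name.find(person.lower())
--         if pos != -1:
--             entity_positions.append((pos, person))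
--
--     for location in locations:
--         pos = clean_name.find(location.lower())
--         if pos != -1:
--             entity_positions.append((pos, location))
--
--     if not entity_positions:
--         return None
--
--     # Sort by position (first occurrence) and return the first entity
--     entity_positions.sort(key=lambda x: x[0])
--     return entity_positions[0][1]
-- ===== SOURCE B (Python) =====
-- def get_first_occurring_entity(airport_name, persons, locations):
--     clean_name = airport_name.lower()
--     best = None  # (pos, entity) with the smallest pos seen so far, earliest wins ties
--     for entity in persons + locations:
--         pos = clean_name.find(entity.lower())
--         if pos != -1:
--             if best is None or pos < best[0]:
--                 best = (pos, entity)
--     return best[1] if best is not None else None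
-- ===== Notes on version B (the rewrite author's own statement) =====
-- stated objective: simpler
-- what changed: Replaces building an intermediate match list plus a stable sort with a single pass that tracks the best (position, entity) pair; strict '<' and persons-before-locations order reproduce the stable sort's tie-break, and both early None returns fall out naturally.
import Mathlib
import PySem

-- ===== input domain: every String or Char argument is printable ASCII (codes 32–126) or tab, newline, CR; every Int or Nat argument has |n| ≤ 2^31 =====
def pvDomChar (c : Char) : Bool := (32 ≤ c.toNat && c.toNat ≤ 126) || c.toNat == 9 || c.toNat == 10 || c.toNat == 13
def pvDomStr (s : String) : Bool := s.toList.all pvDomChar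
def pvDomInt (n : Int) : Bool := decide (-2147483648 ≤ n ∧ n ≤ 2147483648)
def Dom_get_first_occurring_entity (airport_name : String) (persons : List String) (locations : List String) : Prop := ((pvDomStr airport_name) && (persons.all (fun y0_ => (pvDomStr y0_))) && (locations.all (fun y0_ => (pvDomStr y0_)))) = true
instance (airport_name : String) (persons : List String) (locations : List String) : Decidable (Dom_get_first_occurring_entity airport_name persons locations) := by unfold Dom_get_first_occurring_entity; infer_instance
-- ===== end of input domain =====

-- B replaces A's intermediate match list + stable sort by a single pass tracking the
-- best (position, entity) pair (objective: simpler). Return-value equivalence is total.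

-- ===== PORT A =====
def get_first_occurring_entity (airport_name : String) (persons : List String) (locations : List String) : Option String :=
  if persons = [] ∧ locations = [] then none
  else
    let clean_name := PySem.Str.lower airport_name
    let entity_positions := persons.foldl (fun acc person =>
        let pos := PySem.Str.find clean_name (PySem.Str.lower person)
        if pos ≠ -1 then acc ++ [(pos, person)] else acc) ([] : List (Int × String))
    let entity_positions := locations.foldl (fun acc location =>
        let pos := PySem.Str.find clean_name (PySem.Str.lower location)
        if pos ≠ -1 then acc ++ [(pos, location)] else acc) entity_positions
    if entity_positions = [] then none
    else
      match PySem.List.pyGet? (PySem.List.sorted entity_positions (fun x => x.1) false) 0 with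
      | some p => some p.2
      | none => none

-- ===== PORT B =====
def get_first_occurring_entity_alt (airport_name : String) (persons : List String) (locations : List String) : Option String :=
  let clean_name := PySem.Str.lower airport_name
  let best := (persons ++ locations).foldl (fun best entity =>
      let pos := PySem.Str.find clean_name (PySem.Str.lower entity)
      if pos ≠ -1 then
        match best with
        | none => some (pos, entity)
        | some b => if pos < b.1 then some (pos, entity) else some b
      else best) (none : Option (Int × String))
  match best with
  | some b => some b.2
  | none => none

-- ===== PRECONDITION & SPEC =====
def Spec_get_first_occurring_entity (airport_name : String) (persons : List String) (locations : List String) (out : Option String) : Prop := out = get_first_occurring_entity_alt airport_name persons locations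
instance (airport_name : String) (persons : List String) (locations : List String) (out : Option String) : Decidable (Spec_get_first_occurring_entity airport_name persons locations out) := by unfold Spec_get_first_occurring_entity; infer_instance

-- ===== CLAIM (what is proved, stated in full; the proofs are below) =====
def Claim_equal_get_first_occurring_entity : Prop := ∀ (airport_name : String) (persons : List String) (locations : List String), Dom_get_first_occurring_entity airport_name persons locations → Spec_get_first_occurring_entity airport_name persons locations (get_first_occurring_entity airport_name persons locations)

-- ===== LEMMAS AND PROOFS =====

-- pmin: "keep the earlier-seen pair unless the new one is strictly closer to the front"
def pmin (b : Option (Int × String)) (p : Int × String) : Option (Int × String) :=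
  match b with
  | none => some p
  | some q => if p.1 < q.1 then some p else some q

-- matchesL clean xs: the (pos, entity) pairs A appends, in order
def matchesL (clean : String) (xs : List String) : List (Int × String) :=
  xs.filterMap (fun e =>
    let pos := PySem.Str.find clean (PySem.Str.lower e)
    if pos ≠ -1 then some (pos, e) else none)

-- named copies of the two fold bodies (definitionally equal to the port lambdas)
def astep (clean : String) (acc : List (Int × String)) (e : String) : List (Int × String) :=
  let pos := PySem.Str.find clean (PySem.Str.lower e)
  if pos ≠ -1 then acc ++ [(pos, e)] else acc

def bstep (clean : String) (best : Option (Int × String)) (e : String) : Option (Int × String) :=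
  let pos := PySem.Str.find clean (PySem.Str.lower e)
  if pos ≠ -1 then
    match best with
    | none => some (pos, e)
    | some b => if pos < b.1 then some (pos, e) else some b
  else best

theorem matchesL_append (clean : String) (xs ys : List String) :
    matchesL clean (xs ++ ys) = matchesL clean xs ++ matchesL clean ys := by
  simp [matchesL]

theorem astep_eq (clean : String) (acc : List (Int × String)) (e : String) :
    astep clean acc e = acc ++ matchesL clean [e] := by
  unfold astep matchesL
  simp only [List.filterMap_cons, List.filterMap_nil]
  split <;> simp_all

theorem bstep_eq (clean : String) (b : Option (Int × String)) (e : String) :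
    bstep clean b e = (matchesL clean [e]).foldl pmin b := by
  unfold bstep matchesL
  simp only [List.filterMap_cons, List.filterMap_nil]
  split
  · cases b <;> simp [pmin]
  · simp_all

theorem foldl_astep (clean : String) (xs : List String) (acc : List (Int × String)) :
    xs.foldl (astep clean) acc = acc ++ matchesL clean xs := by
  induction xs generalizing acc with
  | nil => simp [matchesL]
  | cons x xs ih =>
    rw [List.foldl_cons, astep_eq, ih, show x :: xs = [x] ++ xs from rfl,
      matchesL_append, List.append_assoc]

theorem foldl_bstep (clean : String) (xs : List String) (b : Option (Int × String)) :
    xs.foldl (bstep clean) b = (matchesL clean xs).foldl pmin b := by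
  induction xs generalizing b with
  | nil => rfl
  | cons x xs ih =>
    rw [List.foldl_cons, bstep_eq, ih, show x :: xs = [x] ++ xs from rfl,
      matchesL_append, List.foldl_append]

theorem head_insertBy (p : Int × String) (acc : List (Int × String)) :
    (PySem.List.insertBy (fun a b : Int × String => decide (a.1 < b.1)) p acc).head? =
      pmin acc.head? p := by
  cases acc with
  | nil => simp [PySem.List.insertBy, pmin]
  | cons y ys =>
    simp only [PySem.List.insertBy, pmin]
    split <;> simp_all

theorem head_foldl_insertBy (L : List (Int × String)) (acc : List (Int × String)) :
    (L.foldl (fun acc x => PySem.List.insertBy (fun a b : Int × String => decide (a.1 < b.1)) x acc) acc).head? =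
      L.foldl pmin acc.head? := by
  induction L generalizing acc with
  | nil => rfl
  | cons p L ih => simp [List.foldl_cons, ih, head_insertBy]

theorem head_sorted (L : List (Int × String)) :
    (PySem.List.sorted L (fun x => x.1) false).head? = L.foldl pmin none := by
  simpa using head_foldl_insertBy L []

theorem pyGet?_zero (ys : List (Int × String)) :
    PySem.List.pyGet? ys (0 : Int) = ys.head? := by
  cases ys <;> simp [PySem.List.pyGet?, PySem.List.pyIdx?]

-- ===== VERDICT (by name: the statement is the Claim_ definition above) =====
theorem ports_eq (clean : String) (persons locations : List String) :
    (if persons = [] ∧ locations = [] then (none : Option String)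
     else
       if locations.foldl (astep clean) (persons.foldl (astep clean) []) = [] then none
       else
         match PySem.List.pyGet? (PySem.List.sorted
             (locations.foldl (astep clean) (persons.foldl (astep clean) [])) (fun x => x.1) false) 0 with
         | some p => some p.2
         | none => none) =
      (match (persons ++ locations).foldl (bstep clean) none with
       | some b => some b.2
       | none => none) := by
  rw [foldl_astep, foldl_astep, foldl_bstep, List.nil_append, ← matchesL_append,
    pyGet?_zero, head_sorted]
  split
  · rename_i h
    obtain ⟨hp, hl⟩ := h
    subst hp; subst hl
    rfl
  · split
    · rename_i hnil
      rw [hnil]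
      rfl
    · rfl

theorem get_first_occurring_entity_spec : Claim_equal_get_first_occurring_entity := by
  intro airport_name persons locations _
  exact ports_eq (PySem.Str.lower airport_name) persons locations
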